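-- pv_equiv track=rewrite | github.com/MrBrantCode/unitest_baseline | mut_generate/mist_train_cf/cf_76901/solution.py | penultimate_prime
-- ===== SOURCE A (Python) =====
-- def is_prime(n):
--     if n <= 1:
--         return False
--     if n == 2:
--         return True
--     if n % 2 == 0:
--         return False
--     i = 3
--     while i * i <= n:
--         if n % i == 0:
--             return False
--         i += 2
--     return True
--
-- def penultimate_prime(arr):
--     primes = []
--     for i in reversed(arr):
--         if is_prime(i):
--             primes.append(i)
--         if len(primes) == 2:
--             return primes[1]
--     return False
-- ===== SOURCE B (Python) =====
-- def _prime(n):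
--     if n < 2:
--         return False
--     d = 2
--     while d * d <= n:
--         if n % d == 0:
--             return False
--         d += 1
--     return True
--
-- def penultimate_prime(arr):
--     prev = last = None
--     for x in arr:
--         if _prime(x):
--             prev, last = last, x
--     return prev if prev is not None else False
-- ===== Notes on version B (the rewrite author's own statement) =====
-- stated objective: alternative
-- what changed: Replaces the reverse scan with a growing primes list and mid-loop early return by a single forward fold keeping only the last two primes seen in two registers, and replaces the odd-step trial division with a plain step-1 trial division from 2.
-- outside the precondition, e.g. on penultimate_prime([4, 7, 8]): A returns False, B returns False
import Mathlib
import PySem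

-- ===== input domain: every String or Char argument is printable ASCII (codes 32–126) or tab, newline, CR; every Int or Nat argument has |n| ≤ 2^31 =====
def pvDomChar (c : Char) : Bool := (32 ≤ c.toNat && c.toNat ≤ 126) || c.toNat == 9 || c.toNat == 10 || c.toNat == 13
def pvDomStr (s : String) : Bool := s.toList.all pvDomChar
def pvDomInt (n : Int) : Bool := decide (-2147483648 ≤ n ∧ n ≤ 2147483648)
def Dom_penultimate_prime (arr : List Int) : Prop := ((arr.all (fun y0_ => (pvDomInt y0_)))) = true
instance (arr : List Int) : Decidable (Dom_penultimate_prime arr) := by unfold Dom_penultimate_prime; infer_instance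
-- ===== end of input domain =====

-- B replaces A's reverse scan with an early return by a forward fold keeping only the
-- last two primes seen, and A's odd-step trial division by a plain step-1 one.

-- ===== PORT A =====
-- is_prime: trial division by odd i while i*i <= n.
def isPrimeLoop (n : Int) (i : Int) : Bool :=
  if h : i * i ≤ n then
    if n % i == 0 then false else isPrimeLoop n (i + 2)
  else true
termination_by (n + 1 - i).toNat
decreasing_by
  have hin : i ≤ n := by nlinarith [sq_nonneg i, mul_self_nonneg i]
  omega

def is_prime (n : Int) : Bool :=
  if n ≤ 1 then false
  else if n == 2 then true
  else if n % 2 == 0 then false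
  else isPrimeLoop n 3

-- the 'for i in reversed(arr)' loop with the 'primes' accumulator and early return
def ppLoopA (l : List Int) (primes : List Int) : Int :=
  match l with
  | [] => 0
  | i :: rest =>
      let primes := if is_prime i then primes ++ [i] else primes
      if primes.length == 2 then (PySem.List.pyGet? primes 1).getD 0
      else ppLoopA rest primes

def penultimate_prime (arr : List Int) : Int := ppLoopA arr.reverse []

-- ===== PORT B =====
-- _prime: trial division by every d from 2 while d*d <= n.
def primeAltLoop (n : Int) (d : Int) : Bool :=
  if h : d * d ≤ n then
    if n % d == 0 then false else primeAltLoop n (d + 1)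
  else true
termination_by (n + 1 - d).toNat
decreasing_by
  have hin : d ≤ n := by nlinarith [sq_nonneg d, sq_nonneg (d - 1)]
  omega

def prime_alt (n : Int) : Bool :=
  if n < 2 then false else primeAltLoop n 2

-- 'prev, last = last, x' on primes, scanned forward
def ppStep (s : Option Int × Option Int) (x : Int) : Option Int × Option Int :=
  if prime_alt x then (s.2, some x) else s

def penultimate_prime_alt (arr : List Int) : Int :=
  match (arr.foldl ppStep (none, none)).1 with
  | some p => p
  | none => 0

-- ===== PRECONDITION & SPEC =====
-- Pre_ excludes inputs with fewer than two prime elements: there the Python returns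
-- the bool False, not a value of the declared Int result type.
def Pre_penultimate_prime (arr : List Int) : Prop :=
  2 ≤ (arr.filter (fun x => decide (Nat.Prime x.toNat))).length
instance (arr : List Int) : Decidable (Pre_penultimate_prime arr) := by
  unfold Pre_penultimate_prime; infer_instance
def pvWitness_penultimate_prime : List Int := [4, 3, 6, 5]

def Spec_penultimate_prime (arr : List Int) (out : Int) : Prop := out = penultimate_prime_alt arr
instance (arr : List Int) (out : Int) : Decidable (Spec_penultimate_prime arr out) := by unfold Spec_penultimate_prime; infer_instance

-- ===== CLAIM (what is proved, stated in full; the proofs are below) =====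
def Claim_equal_penultimate_prime : Prop := ∀ (arr : List Int), Dom_penultimate_prime arr → Pre_penultimate_prime arr → Spec_penultimate_prime arr (penultimate_prime arr)

-- ===== LEMMAS AND PROOFS =====

-- A's trial division is correct: the loop decides primality of n (odd n ≥ 3, odd i ≥ 3,
-- no divisor below i)
theorem isPrimeLoop_correct (n i : Int) (hn : 3 ≤ n) (hodd : n % 2 = 1)
    (hi : 3 ≤ i) (hiodd : i % 2 = 1) (hbelow : ∀ d : Int, 2 ≤ d → d < i → ¬ d ∣ n) :
    isPrimeLoop n i = decide (Nat.Prime n.toNat) := by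
  revert hi hiodd hbelow
  induction i using isPrimeLoop.induct n with
  | case1 i h hdvd =>
      intro hi _ _
      have hidvd : i ∣ n := Int.dvd_of_emod_eq_zero (by simpa using hdvd)
      have hlt : i < n := by nlinarith
      have hdvdN : i.toNat ∣ n.toNat := by
        have h1 : (i.toNat : Int) ∣ (n.toNat : Int) := by
          rwa [Int.toNat_of_nonneg (by omega), Int.toNat_of_nonneg (by omega)]
        exact_mod_cast h1
      have : ¬ Nat.Prime n.toNat := by
        intro hp
        rcases hp.eq_one_or_self_of_dvd i.toNat hdvdN with h1 | h2 <;> omega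
      simp [isPrimeLoop, h, hdvd, this]
  | case2 i h hdvd ih =>
      intro hi hiodd hbelow
      have hstep : isPrimeLoop n i = isPrimeLoop n (i + 2) := by
        rw [isPrimeLoop]; simp [h, hdvd]
      rw [hstep]
      refine ih (by omega) (by omega) ?_
      intro d hd2 hdlt hddvd
      rcases lt_or_ge d i with hlt | hge
      · exact hbelow d hd2 hlt hddvd
      · have hdeq : d = i ∨ d = i + 1 := by omega
        rcases hdeq with rfl | rfl
        · exact hdvd (by simpa using Int.emod_eq_zero_of_dvd hddvd)
        · have h2d : (2 : Int) ∣ (i + 1) := by omega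
          have : (2 : Int) ∣ n := h2d.trans hddvd
          omega
  | case3 i h =>
      intro hi _ hbelow
      have hp : Nat.Prime n.toNat := by
        by_contra hnp
        have hpos : 0 < n.toNat := by omega
        have hsq := Nat.minFac_sq_le_self hpos hnp
        have h2 : 2 ≤ n.toNat.minFac := (Nat.minFac_prime (by omega : n.toNat ≠ 1)).two_le
        have hdvd : (n.toNat.minFac : Int) ∣ n := by
          have := Nat.minFac_dvd n.toNat
          have h1 : (n.toNat.minFac : Int) ∣ (n.toNat : Int) := Int.natCast_dvd_natCast.mpr this
          rwa [Int.toNat_of_nonneg (by omega)] at h1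
        have hlt : (n.toNat.minFac : Int) < i := by
          rw [not_le] at h
          nlinarith [Int.toNat_of_nonneg (show (0:Int) ≤ n by omega),
            (show ((n.toNat.minFac : Int)) * ((n.toNat.minFac : Int)) ≤ n by
              have : (n.toNat.minFac ^ 2 : Int) ≤ (n.toNat : Int) := by exact_mod_cast hsq
              rw [Int.toNat_of_nonneg (by omega)] at this; nlinarith)]
        exact hbelow _ (by exact_mod_cast h2) hlt hdvd
      rw [isPrimeLoop]
      simp [h, hp]

-- is_prime computes exactly Nat primality of n.toNat
theorem is_prime_eq (n : Int) : is_prime n = decide (Nat.Prime n.toNat) := by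
  unfold is_prime
  split_ifs with h1 h2 h3
  · have : n.toNat = 0 ∨ n.toNat = 1 := by omega
    rcases this with h | h <;> rw [h] <;> decide
  · have : n = 2 := by simpa using h2
    subst this
    simp [Nat.prime_two]
  · have hn3 : 3 ≤ n := by
      simp at h2
      omega
    have h2d : (2 : Int) ∣ n := by simpa using h3
    have : ¬ Nat.Prime n.toNat := by
      intro hp
      have : (2 : Nat) ∣ n.toNat := by
        have h1 : ((2:Nat) : Int) ∣ (n.toNat : Int) := by
          rwa [Int.toNat_of_nonneg (by omega)]
        exact_mod_cast h1
      rcases hp.eq_one_or_self_of_dvd 2 this with h | h <;> omega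
    simp [this]
  · have hn3 : 3 ≤ n := by
      simp at h2
      omega
    have hodd : n % 2 = 1 := by
      have : ¬ (2 : Int) ∣ n := by simpa using h3
      omega
    refine isPrimeLoop_correct n 3 hn3 hodd (by omega) (by decide) ?_
    intro d hd2 hdlt hddvd
    have : d = 2 := by omega
    subst this
    omega

-- B's trial division is correct too (n ≥ 2, d ≥ 2, no divisor below d)
theorem primeAltLoop_correct (n d : Int) (hn : 2 ≤ n) (hd : 2 ≤ d)
    (hbelow : ∀ e : Int, 2 ≤ e → e < d → ¬ e ∣ n) :
    primeAltLoop n d = decide (Nat.Prime n.toNat) := by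
  revert hd hbelow
  induction d using primeAltLoop.induct n with
  | case1 d h hdvd =>
      intro hd _
      have hidvd : d ∣ n := Int.dvd_of_emod_eq_zero (by simpa using hdvd)
      have hlt : d < n := by nlinarith
      have hdvdN : d.toNat ∣ n.toNat := by
        have h1 : (d.toNat : Int) ∣ (n.toNat : Int) := by
          rwa [Int.toNat_of_nonneg (by omega), Int.toNat_of_nonneg (by omega)]
        exact_mod_cast h1
      have : ¬ Nat.Prime n.toNat := by
        intro hp
        rcases hp.eq_one_or_self_of_dvd d.toNat hdvdN with h1 | h2 <;> omega
      simp [primeAltLoop, h, hdvd, this]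
  | case2 d h hdvd ih =>
      intro hd hbelow
      have hstep : primeAltLoop n d = primeAltLoop n (d + 1) := by
        rw [primeAltLoop]; simp [h, hdvd]
      rw [hstep]
      refine ih (by omega) ?_
      intro e he2 helt heddvd
      rcases lt_or_ge e d with hlt | hge
      · exact hbelow e he2 hlt heddvd
      · have : e = d := by omega
        subst this
        exact hdvd (by simpa using Int.emod_eq_zero_of_dvd heddvd)
  | case3 d h =>
      intro hd hbelow
      have hp : Nat.Prime n.toNat := by
        by_contra hnp
        have hpos : 0 < n.toNat := by omega
        have hsq := Nat.minFac_sq_le_self hpos hnp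
        have h2 : 2 ≤ n.toNat.minFac := (Nat.minFac_prime (by omega : n.toNat ≠ 1)).two_le
        have hdvd : (n.toNat.minFac : Int) ∣ n := by
          have := Nat.minFac_dvd n.toNat
          have h1 : (n.toNat.minFac : Int) ∣ (n.toNat : Int) := Int.natCast_dvd_natCast.mpr this
          rwa [Int.toNat_of_nonneg (by omega)] at h1
        have hlt : (n.toNat.minFac : Int) < d := by
          rw [not_le] at h
          nlinarith [Int.toNat_of_nonneg (show (0:Int) ≤ n by omega),
            (show ((n.toNat.minFac : Int)) * ((n.toNat.minFac : Int)) ≤ n by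
              have : (n.toNat.minFac ^ 2 : Int) ≤ (n.toNat : Int) := by exact_mod_cast hsq
              rw [Int.toNat_of_nonneg (by omega)] at this; nlinarith)]
        exact hbelow _ (by exact_mod_cast h2) hlt hdvd
      rw [primeAltLoop]
      simp [h, hp]

theorem prime_alt_eq (n : Int) : prime_alt n = decide (Nat.Prime n.toNat) := by
  unfold prime_alt
  split_ifs with h1
  · have : n.toNat = 0 ∨ n.toNat = 1 := by omega
    rcases this with h | h <;> rw [h] <;> decide
  · refine primeAltLoop_correct n 2 (by omega) (by omega) ?_
    intro e he2 helt
    omega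

-- the two primality tests agree
theorem prime_alt_eq_is_prime (n : Int) : prime_alt n = is_prime n := by
  rw [prime_alt_eq, is_prime_eq]

-- the pair of registers B maintains, as a function of the primes seen so far
def lastTwo (ps : List Int) : Option Int × Option Int :=
  (if 2 ≤ ps.length then ps[ps.length - 2]? else none, ps.getLast?)

theorem lastTwo_append_one (ps : List Int) (a : Int) :
    lastTwo (ps ++ [a]) = (ps.getLast?, some a) := by
  unfold lastTwo
  cases ps with
  | nil => simp
  | cons b l =>
      have h2 : 2 ≤ ((b :: l) ++ [a]).length := by simp
      have hlt : ((b :: l) ++ [a]).length - 2 < (b :: l).length := by simp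
      rw [if_pos h2, List.getElem?_append_left hlt]
      simp only [Prod.mk.injEq]
      refine ⟨?_, by rw [List.getLast?_concat]⟩
      rw [List.getLast?_eq_getElem?]
      congr 1
      simp

theorem foldl_ppStep (l : List Int) (ps : List Int) :
    l.foldl ppStep (lastTwo ps) = lastTwo (ps ++ l.filter (fun x => prime_alt x)) := by
  induction l generalizing ps with
  | nil => simp
  | cons a rest ih =>
      by_cases ha : prime_alt a
      · have hstep : ppStep (lastTwo ps) a = lastTwo (ps ++ [a]) := by
          rw [lastTwo_append_one]
          simp [ppStep, ha, lastTwo]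
        simp only [List.foldl_cons, hstep, List.filter_cons, ha, if_pos]
        rw [ih (ps ++ [a])]
        simp
      · simp only [List.foldl_cons, List.filter_cons, ha]
        have hstep : ppStep (lastTwo ps) a = lastTwo ps := by simp [ppStep, ha]
        rw [hstep, ih ps]
        simp

-- With one prime already collected, A's loop returns the first prime of the rest.
theorem ppLoopA_one (l : List Int) (p : Int)
    (h : l.filter (fun x => is_prime x) ≠ []) :
    ppLoopA l [p] = (l.filter (fun x => is_prime x)).headD 0 := by
  induction l with
  | nil => simp at h
  | cons a rest ih =>
      by_cases ha : is_prime a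
      · simp [ppLoopA, ha, PySem.List.pyGet?, PySem.List.pyIdx?]
      · simp only [List.filter_cons, ha] at h ⊢
        simpa [ppLoopA, ha] using ih (by simpa using h)

-- Starting empty, A's loop returns the second prime found.
theorem ppLoopA_nil (l : List Int)
    (h : 2 ≤ (l.filter (fun x => is_prime x)).length) :
    ppLoopA l [] = (l.filter (fun x => is_prime x))[1]?.getD 0 := by
  induction l with
  | nil => simp at h
  | cons a rest ih =>
      by_cases ha : is_prime a
      · have hr : rest.filter (fun x => is_prime x) ≠ [] := by
          simp only [List.filter_cons, ha, if_pos] at h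
          intro he; simp [he] at h
        simp only [List.filter_cons, ha, if_pos]
        have := ppLoopA_one rest a hr
        cases hfe : rest.filter (fun x => is_prime x) with
        | nil => exact absurd hfe hr
        | cons q qs => simp [ppLoopA, ha, hfe, this]
      · simp only [List.filter_cons, ha] at h ⊢
        simpa [ppLoopA, ha] using ih (by simpa using h)

-- ===== VERDICT (by name: the statement is the Claim_ definition above) =====

theorem penultimate_prime_spec : Claim_equal_penultimate_prime := by
  intro arr _ hpre
  unfold Spec_penultimate_prime penultimate_prime penultimate_prime_alt
  set ps := arr.filter (fun x => is_prime x) with hps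
  have hlen : 2 ≤ ps.length := by
    have hfe : arr.filter (fun x => is_prime x)
        = arr.filter (fun x => decide (Nat.Prime x.toNat)) := by
      apply List.filter_congr
      intro x _
      exact is_prime_eq x
    rw [hps, hfe]
    exact hpre
  -- B's side: the fold computes lastTwo of the filtered list
  have hfB : arr.filter (fun x => prime_alt x) = ps := by
    rw [hps]
    exact List.filter_congr (fun x _ => prime_alt_eq_is_prime x)
  have hB : arr.foldl ppStep (none, none) = lastTwo ps := by
    have := foldl_ppStep arr []
    simpa [lastTwo, hfB] using this
  rw [hB]
  -- A's side: second prime of the reversed list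
  have hrev : arr.reverse.filter (fun x => is_prime x) = ps.reverse := by
    simp [hps, List.filter_reverse]
  have h2 : 2 ≤ (arr.reverse.filter (fun x => is_prime x)).length := by
    rw [hrev]; simpa using hlen
  rw [ppLoopA_nil arr.reverse h2, hrev]
  -- both are ps[ps.length - 2]
  have hlt : ps.length - 2 < ps.length := by omega
  have h1 : 1 < ps.reverse.length := by simpa using hlen
  rw [List.getElem?_eq_getElem h1, List.getElem_reverse]
  unfold lastTwo
  rw [if_pos hlen, List.getElem?_eq_getElem hlt]
  have hidx : ps.length - 1 - 1 = ps.length - 2 := by omega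
  simp [hidx]
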